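-- pv_equiv track=rewrite | github.com/yuchenlin/dictNER | train-dict-ner.py | simple_label
-- ===== SOURCE A (Python) =====
-- def simple_label(sent, pred, name, tag):
--
--     if name not in " ".join(sent):
--         return pred
--     name_lst = name.split()
--     starts = [i for i, j in enumerate(sent)
--               if j == name_lst[0] and sent[i:min(i+len(name_lst), len(sent))] == name_lst]
--     for s in starts:
--         if len(set(pred[s:s+len(name_lst)])) == 1 and pred[s] == "O":
--             pred[s] = "B-" + tag
--             for i in range(s+1, s+len(name_lst)):
--                 pred[i] = "I-" + tag
--     return pred
-- ===== SOURCE B (Python) =====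
-- def simple_label(sent, pred, name, tag):
--     # Return-value AND in-place mutation of pred match A's on the stated domain.
--     if name not in " ".join(sent):
--         return pred
--     name_lst = name.split()
--     L = len(name_lst)
--     if L == 0:
--         return pred
--     i = 0
--     limit = len(sent) - L
--     while i <= limit:
--         if sent[i:i+L] == name_lst and pred[i:i+L] == ["O"] * L:
--             pred[i:i+L] = ["B-" + tag] + ["I-" + tag] * (L - 1)
--             i += L
--         else:
--             i += 1
--     return pred
-- ===== Notes on version B (the rewrite author's own statement) =====
-- stated objective: alternative
-- what changed: A collects all match start indices in a separate comprehension pass and then folds over that list re-testing each start against the mutated tag list; B fuses everything into a single left-to-right scan that compares the token window and the tag window directly, relabels in place, and jumps past a labelled span (provably equivalent because A's per-start re-test always rejects starts overlapping a freshly labelled span).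
-- outside the precondition, e.g. on simple_label(['a', 'b'], ['O'], 'b', 'T'): A returns ['O'], B returns ['O']; on simple_label(['a', 'b'], ['O'], 'a b', 'T'): A raises IndexError, B returns ['O']
import Mathlib
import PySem

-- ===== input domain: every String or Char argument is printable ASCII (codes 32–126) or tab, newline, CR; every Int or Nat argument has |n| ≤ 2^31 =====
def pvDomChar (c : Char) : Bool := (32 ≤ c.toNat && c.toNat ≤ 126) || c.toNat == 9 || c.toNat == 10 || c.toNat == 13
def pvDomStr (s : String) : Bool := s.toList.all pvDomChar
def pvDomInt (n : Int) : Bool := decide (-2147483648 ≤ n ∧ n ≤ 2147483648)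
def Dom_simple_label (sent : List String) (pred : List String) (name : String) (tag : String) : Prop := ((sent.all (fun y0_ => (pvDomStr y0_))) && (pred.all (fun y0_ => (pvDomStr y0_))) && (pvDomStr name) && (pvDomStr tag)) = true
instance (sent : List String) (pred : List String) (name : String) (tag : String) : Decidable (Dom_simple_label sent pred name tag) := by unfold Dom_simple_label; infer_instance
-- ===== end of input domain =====

-- B replaces A's two-phase "collect all start indices, then re-test and relabel each" with a single
-- fused left-to-right scan that labels a match and jumps past it (objective: alternative/simpler).
-- A mutates `pred` in place and returns it; B performs the same in-place mutation.

-- ===== PORT A =====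
-- `name_lst[0]` is ported as `pyGet? name_lst 0` compared under `some` (Python raises on empty
-- `name_lst`; those inputs are outside Pre_), `pred[s]` as `pyGet?`, `pred[i] = v` as `pySetD`
-- (in range under Pre_, where Python does not raise).
def simple_label (sent : List String) (pred : List String) (name : String) (tag : String) : List String :=
  if !(PySem.Str.isIn name (PySem.Str.join " " sent)) then pred
  else
    let name_lst := PySem.Str.split₀ name
    let starts : List Int :=
      ((PySem.List.enumerate sent 0).filter (fun p =>
          some p.2 == PySem.List.pyGet? name_lst 0 &&
          PySem.List.slice sent (some p.1) (some (min (p.1 + (name_lst.length : Int)) (sent.length : Int))) == name_lst)).map (·.1)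
    starts.foldl (fun pr s =>
      if (PySem.Set.ofList (PySem.List.slice pr (some s) (some (s + (name_lst.length : Int))))).length == 1
          && PySem.List.pyGet? pr s == some "O" then
        (PySem.List.pyRange (s + 1) (s + (name_lst.length : Int)) 1).foldl
          (fun p i => PySem.List.pySetD p i ("I-" ++ tag))
          (PySem.List.pySetD pr s ("B-" ++ tag))
      else pr) pred

-- ===== PORT B =====
-- the while loop of Source B; `i <= len(sent) - L` is `i + L ≤ len(sent)` (Python ints go negative);
-- the slice assignment `pred[i:i+L] = new` is `pred[:i] ++ new ++ pred[i+L:]`.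
def pvScanB (sent : List String) (nl : List String) (tag : String) (hL : nl ≠ [])
    (i : Nat) (pred : List String) : List String :=
  if h : i + nl.length ≤ sent.length then
    if PySem.List.slice sent (some (i : Int)) (some ((i : Int) + (nl.length : Int))) == nl
        && PySem.List.slice pred (some (i : Int)) (some ((i : Int) + (nl.length : Int))) == List.replicate nl.length "O" then
      pvScanB sent nl tag hL (i + nl.length)
        (PySem.List.slice pred none (some (i : Int)) ++
          (("B-" ++ tag) :: List.replicate (nl.length - 1) ("I-" ++ tag)) ++
          PySem.List.slice pred (some ((i : Int) + (nl.length : Int))) none)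
    else pvScanB sent nl tag hL (i + 1) pred
  else pred
termination_by sent.length + 1 - i
decreasing_by
  · have : 0 < nl.length := List.length_pos_iff.mpr hL
    omega
  · omega

def simple_label_alt (sent : List String) (pred : List String) (name : String) (tag : String) : List String :=
  if !(PySem.Str.isIn name (PySem.Str.join " " sent)) then pred
  else
    let nl := PySem.Str.split₀ name
    if hL : nl = [] then pred
    else pvScanB sent nl tag hL 0 pred

-- ===== PRECONDITION & SPEC =====
-- token-sequence match of the name's words at position i of sent
def pvM (sent nl : List String) (i : Nat) : Bool := decide ((sent.drop i).take nl.length = nl)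

-- Pre_ excludes whitespace-only names occurring as a substring of the joined sentence (A raises
-- IndexError on name_lst[0]) and pred shorter than sent when the name actually occurs in it as a
-- token sequence, where A can raise IndexError while relabelling a span running past the end of
-- pred (for NER, pred is a tag per token, so a shorter pred is malformed; on a few such inputs
-- whose tag windows block every relabelling A happens to return pred unchanged).
def Pre_simple_label (sent : List String) (pred : List String) (name : String) (tag : String) : Prop :=
  PySem.Str.split₀ name ≠ [] ∧
    (sent.length ≤ pred.length ∨
      PySem.Str.isIn name (PySem.Str.join " " sent) = false ∨
      ∀ i, i < sent.length → pvM sent (PySem.Str.split₀ name) i = false)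
instance (sent : List String) (pred : List String) (name : String) (tag : String) : Decidable (Pre_simple_label sent pred name tag) := by unfold Pre_simple_label; infer_instance

def pvWitness_simple_label : List String × List String × String × String :=
  (["Jim", "Bob", "runs"], ["O", "O", "O"], "Jim Bob", "PER")

def Spec_simple_label (sent : List String) (pred : List String) (name : String) (tag : String) (out : List String) : Prop := out = simple_label_alt sent pred name tag
instance (sent : List String) (pred : List String) (name : String) (tag : String) (out : List String) : Decidable (Spec_simple_label sent pred name tag out) := by unfold Spec_simple_label; infer_instance

-- ===== CLAIM (what is proved, stated in full; the proofs are below) =====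
def Claim_equal_simple_label : Prop := ∀ (sent : List String) (pred : List String) (name : String) (tag : String), Dom_simple_label sent pred name tag → Pre_simple_label sent pred name tag → Spec_simple_label sent pred name tag (simple_label sent pred name tag)

-- ===== LEMMAS AND PROOFS =====

-- A's fold step, with the Int index instantiated at a Nat cast (the form the fold takes after
-- the `starts` list is rewritten to a list of casts).
def pvCondA (nl : List String) (pr : List String) (s : Nat) : Bool :=
  ((PySem.Set.ofList (PySem.List.slice pr (some (s : Int)) (some ((s : Int) + (nl.length : Int))))).length == 1
    && PySem.List.pyGet? pr (s : Int) == some "O")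

def pvLabelA (tag : String) (nl : List String) (pr : List String) (s : Nat) : List String :=
  (PySem.List.pyRange ((s : Int) + 1) ((s : Int) + (nl.length : Int)) 1).foldl
    (fun p i => PySem.List.pySetD p i ("I-" ++ tag))
    (PySem.List.pySetD pr (s : Int) ("B-" ++ tag))

-- the relabelled pred, in B's take/middle/drop form
def pvLabelB (tag : String) (L : Nat) (pr : List String) (i : Nat) : List String :=
  pr.take i ++ (("B-" ++ tag) :: List.replicate (L - 1) ("I-" ++ tag)) ++ pr.drop (i + L)

theorem pvFoldl_fixed {α β : Type} (l : List β) (f : α → β → α) (b : α)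
    (h : ∀ x ∈ l, f b x = b) : l.foldl f b = b := by
  induction l with
  | nil => rfl
  | cons x xs ih =>
    simp only [List.foldl_cons, h x (by simp)]
    exact ih (fun y hy => h y (by simp [hy]))

theorem pvOfList_len_one (l : List String) (hl : l ≠ []) :
    ((PySem.Set.ofList l).length = 1 ∧ l[0]? = some "O") ↔ l = List.replicate l.length "O" := by
  constructor
  · rintro ⟨h1, h2⟩
    obtain ⟨a, ha⟩ := List.length_eq_one_iff.mp h1
    have hmem : ∀ x ∈ l, x = a := by
      intro x hx
      have hx' : x ∈ PySem.Set.ofList l := (PySem.Set.mem_ofList _ _).mpr hx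
      rw [ha] at hx'; simpa using hx'
    have h0 : "O" ∈ l := by
      have := List.getElem?_eq_some_iff.mp h2
      obtain ⟨hlt, he⟩ := this
      exact he ▸ List.getElem_mem hlt
    have haO : a = "O" := (hmem _ h0).symm
    refine List.eq_replicate_iff.mpr ⟨rfl, fun b hb => (hmem b hb).trans haO⟩
  · intro h
    have hn : 0 < l.length := List.length_pos_iff.mpr hl
    constructor
    · have hmem : ∀ x ∈ l, x = "O" := by
        intro x hx; rw [h] at hx; exact (List.eq_of_mem_replicate hx)
      have hO : "O" ∈ PySem.Set.ofList l := (PySem.Set.mem_ofList _ _).mpr (by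
        rw [h]; exact List.mem_replicate.mpr ⟨by omega, rfl⟩)
      have hnd : (PySem.Set.ofList l).Nodup := PySem.Set.nodup_ofList l
      have hmem' : ∀ x ∈ PySem.Set.ofList l, x = "O" := fun x hx => hmem x ((PySem.Set.mem_ofList _ _).mp hx)
      rcases hs : PySem.Set.ofList l with _ | ⟨b, t⟩
      · rw [hs] at hO; simp at hO
      · rw [hs] at hmem' hnd
        have hb : b = "O" := hmem' b (by simp)
        have ht : t = [] := by
          rcases t with _ | ⟨c, t'⟩
          · rfl
          · exfalso
            have hc : c = "O" := hmem' c (by simp)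
            rw [hb, hc] at hnd
            simp at hnd
        simp [ht]
    · rw [h]
      simp [hn]

theorem pvCondA_eq (nl pr : List String) (s : Nat) (hL : nl ≠ []) (hlen : s + nl.length ≤ pr.length) :
    pvCondA nl pr s = decide ((pr.drop s).take nl.length = List.replicate nl.length "O") := by
  unfold pvCondA
  have hL0 : 0 < nl.length := List.length_pos_iff.mpr hL
  set l := (pr.drop s).take nl.length with hldef
  have hlen' : l.length = nl.length := by
    simp [hldef]; omega
  have hget : pr[s]? = l[0]? := by
    rw [hldef, List.getElem?_take_of_lt hL0, List.getElem?_drop]; norm_num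
  rw [Bool.eq_iff_iff]
  simp only [PySem.List.slice_natCast_add, PySem.List.pyGet?_natCast, Bool.and_eq_true,
    beq_iff_eq, decide_eq_true_eq, ← hldef, hget]
  rw [← hlen']
  exact pvOfList_len_one l (by intro h; rw [h] at hlen'; simp at hlen'; omega)

theorem pvSetRun (v : String) (m : Nat) : ∀ (j : Nat) (p : List String), j + m ≤ p.length →
    (List.range m).foldl (fun q k => q.set (j + k) v) p
      = p.take j ++ List.replicate m v ++ p.drop (j + m) := by
  induction m with
  | zero => intro j p h; simp [List.take_append_drop]
  | succ m ih =>
    intro j p h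
    rw [List.range_succ, List.foldl_append, ih j p (by omega)]
    simp only [List.foldl_cons, List.foldl_nil]
    have hlt : j + m < p.length := by omega
    have hltake : (p.take j ++ List.replicate m v).length = j + m := by
      simp [List.length_take]; omega
    rw [List.set_append_right _ _ (by rw [hltake])]
    rw [hltake, Nat.sub_self]
    have hdrop : p.drop (j + m) = p[j+m] :: p.drop (j + m + 1) := List.drop_eq_getElem_cons hlt
    rw [hdrop, List.set_cons_zero]
    simp [List.replicate_succ', List.append_assoc, Nat.add_assoc]

theorem pvLabelA_eq (tag : String) (nl pr : List String) (s : Nat) (hL : nl ≠ [])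
    (hlen : s + nl.length ≤ pr.length) :
    pvLabelA tag nl pr s = pvLabelB tag nl.length pr s := by
  unfold pvLabelA pvLabelB
  have hL0 : 0 < nl.length := List.length_pos_iff.mpr hL
  rw [PySem.List.pyRange_one, List.foldl_map, PySem.List.pySetD_natCast]
  have hcnt : ((s : Int) + (nl.length : Int) - ((s : Int) + 1)).toNat = nl.length - 1 := by omega
  rw [hcnt]
  simp only [show ∀ k : Nat, ((s:Int) + 1 + (k:Int)) = (((s+1+k : Nat)) : Int) from fun k => by push_cast; ring,
    PySem.List.pySetD_natCast]
  rw [pvSetRun ("I-" ++ tag) (nl.length - 1) (s+1) (pr.set s ("B-" ++ tag)) (by simp; omega)]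
  have e1 : s + 1 + (nl.length - 1) = s + nl.length := by omega
  rw [e1, List.drop_set_of_lt (by omega), List.take_set]
  have e2 : (pr.take (s+1)).set s ("B-" ++ tag) = pr.take s ++ [("B-" ++ tag)] := by
    rw [List.set_eq_take_cons_drop _ (by simp; omega)]
    rw [List.take_take, List.drop_take]
    simp
  rw [e2]
  simp [List.append_assoc]

theorem pvSliceMin (sent : List String) (j L : Nat) :
    PySem.List.slice sent (some (j : Int)) (some (min ((j : Int) + (L : Int)) ((sent.length : Int))))
      = (sent.drop j).take L := by
  rw [show min ((j : Int) + (L : Int)) ((sent.length : Int)) = ((min (j + L) sent.length : Nat) : Int) from by push_cast; simp]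
  rw [PySem.List.slice_natCast]
  rcases Nat.le_total (j + L) sent.length with h | h
  · rw [Nat.min_eq_left h]; congr 1; omega
  · rw [Nat.min_eq_right (by omega)]
    rw [List.take_of_length_le (by simp), List.take_of_length_le (by simp; omega)]

theorem pvStarts_eq (sent nl : List String) (hL : nl ≠ []) :
    ((PySem.List.enumerate sent 0).filter (fun p =>
        some p.2 == PySem.List.pyGet? nl 0 &&
        PySem.List.slice sent (some p.1) (some (min (p.1 + (nl.length : Int)) (sent.length : Int))) == nl)).map (·.1)
    = ((List.range sent.length).filter (pvM sent nl)).map (fun i => Int.ofNat i) := by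
  have hL0 : 0 < nl.length := List.length_pos_iff.mpr hL
  rw [show PySem.List.enumerate sent 0 = PySem.List.enumerate sent from rfl]
  rw [PySem.List.enumerate_eq_map_pyRange sent ""]
  rw [show PySem.List.len sent = ((sent.length : Nat) : Int) from by simp]
  rw [PySem.List.pyRange_zero_natCast, List.map_map, List.filter_map, List.map_map]
  rw [List.filter_congr ?_]
  · rfl
  intro j hj
  rw [List.mem_range] at hj
  show (some (PySem.List.pyGetD sent ((j:Nat):Int) "") == PySem.List.pyGet? nl 0 &&
        PySem.List.slice sent (some ((j:Nat):Int)) (some (min (((j:Nat):Int) + (nl.length : Int)) (sent.length : Int))) == nl) = pvM sent nl j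
  rw [pvSliceMin sent j nl.length, PySem.List.pyGetD_natCast]
  by_cases hM : (sent.drop j).take nl.length = nl
  · have h0 : ((sent.drop j).take nl.length)[0]? = sent[j]? := by
      rw [List.getElem?_take_of_lt hL0, List.getElem?_drop, Nat.add_zero]
    have hget : PySem.List.pyGet? nl 0 = nl[0]? := by
      obtain ⟨a, t, rfl⟩ := List.exists_cons_of_ne_nil hL
      rw [PySem.List.pyGet?_zero_cons]; rfl
    have hfirst : some (sent.getD j "") = nl[0]? := by
      rw [← hM, h0, List.getD_eq_getElem?_getD, List.getElem?_eq_getElem hj]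
      rfl
    simp [pvM, hM, hget, ← hfirst]
  · simp [pvM, hM]

theorem pvRange'_cons (s n : Nat) (h : 0 < n) : List.range' s n = s :: List.range' (s+1) (n-1) := by
  cases n with
  | zero => omega
  | succ m => simp [List.range'_succ]

theorem pvLabelB_getElem? (tag : String) (L : Nat) (pr : List String) (i x : Nat)
    (hx1 : i < x) (hx2 : x < i + L) (hlen : i + L ≤ pr.length) :
    (pvLabelB tag L pr i)[x]? = some ("I-" ++ tag) := by
  unfold pvLabelB
  have hti : (pr.take i).length = i := by simp; omega
  rw [List.append_assoc, List.getElem?_append_right (by omega), hti]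
  have hx3 : x - i = (x - i - 1) + 1 := by omega
  rw [List.cons_append, hx3, List.getElem?_cons_succ]
  rw [List.getElem?_append_left (by simp; omega)]
  rw [List.getElem?_replicate_of_lt (by omega)]

theorem pvLabelB_length (tag : String) (L : Nat) (pr : List String) (i : Nat)
    (hL : 0 < L) (hlen : i + L ≤ pr.length) : (pvLabelB tag L pr i).length = pr.length := by
  unfold pvLabelB
  simp
  omega

theorem pvIO_ne : ∀ tag : String, ("I-" ++ tag) ≠ "O" := by
  intro tag h
  have h2 := congrArg String.toList h
  rw [String.toList_append] at h2
  simp [show "I-".toList = ['I', '-'] from rfl, show "O".toList = ['O'] from rfl] at h2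

theorem pvFold_eq_scan (sent nl : List String) (tag : String) (hL : nl ≠ [])
    (i : Nat) (pred : List String) (hp : sent.length ≤ pred.length) :
    ((List.range' i (sent.length - i)).filter (pvM sent nl)).foldl
        (fun pr s => if pvCondA nl pr s then pvLabelA tag nl pr s else pr) pred
    = pvScanB sent nl tag hL i pred := by
  have hL0 : 0 < nl.length := List.length_pos_iff.mpr hL
  induction i, pred using pvScanB.induct sent nl tag hL with
  | case1 i pred h hcond ih =>
    rw [Bool.and_eq_true, beq_iff_eq, beq_iff_eq, PySem.List.slice_natCast_add, PySem.List.slice_natCast_add] at hcond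
    obtain ⟨hM, hO⟩ := hcond
    have hplen : i + nl.length ≤ pred.length := by omega
    rw [pvScanB]
    rw [dif_pos h, if_pos (by
      rw [Bool.and_eq_true, beq_iff_eq, beq_iff_eq, PySem.List.slice_natCast_add, PySem.List.slice_natCast_add]
      exact ⟨hM, hO⟩)]
    have hBeq : PySem.List.slice pred none (some (i : Int)) ++
        (("B-" ++ tag) :: List.replicate (nl.length - 1) ("I-" ++ tag)) ++
        PySem.List.slice pred (some ((i : Int) + (nl.length : Int))) none = pvLabelB tag nl.length pred i := by
      rw [PySem.List.slice_to_natCast,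
        show ((i : Int) + (nl.length : Int)) = (((i + nl.length : Nat)) : Int) from by push_cast; ring,
        PySem.List.slice_from_natCast]
      rfl
    rw [hBeq] at ih ⊢
    rw [pvRange'_cons i (sent.length - i) (by omega),
      show sent.length - i - 1 = (nl.length - 1) + (sent.length - (i + nl.length)) from by omega,
      ← List.range'_append_1,
      show i + 1 + (nl.length - 1) = i + nl.length from by omega]
    rw [List.filter_cons_of_pos (by simp [pvM, hM]), List.foldl_cons]
    rw [if_pos (by rw [pvCondA_eq nl pred i hL hplen]; simp [hO])]
    rw [pvLabelA_eq tag nl pred i hL hplen]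
    rw [List.filter_append, List.foldl_append]
    have hmid : (List.filter (pvM sent nl) (List.range' (i + 1) (nl.length - 1))).foldl
        (fun pr s => if pvCondA nl pr s = true then pvLabelA tag nl pr s else pr)
        (pvLabelB tag nl.length pred i) = pvLabelB tag nl.length pred i := by
      apply pvFoldl_fixed
      intro x hx
      have hx' := List.mem_range'_1.mp (List.mem_of_mem_filter hx)
      have hget : (pvLabelB tag nl.length pred i)[x]? = some ("I-" ++ tag) :=
        pvLabelB_getElem? tag nl.length pred i x (by omega) (by omega) hplen
      have hcond' : pvCondA nl (pvLabelB tag nl.length pred i) x = false := by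
        unfold pvCondA
        rw [PySem.List.pyGet?_natCast, hget]
        simp [pvIO_ne tag]
      simp only [hcond', Bool.false_eq_true, if_false]
    rw [hmid]
    exact ih (by rw [pvLabelB_length tag nl.length pred i hL0 hplen]; exact hp)
  | case2 i pred h hcond ih =>
    rw [pvScanB, dif_pos h, if_neg hcond]
    rw [pvRange'_cons i (sent.length - i) (by omega),
      show sent.length - i - 1 = sent.length - (i + 1) from by omega]
    cases hM : pvM sent nl i with
    | false =>
      rw [List.filter_cons_of_neg (by simp [hM])]
      exact ih hp
    | true =>
      rw [List.filter_cons_of_pos (by simp [hM])]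
      rw [List.foldl_cons]
      have hO : ¬ ((pred.drop i).take nl.length = List.replicate nl.length "O") := by
        intro hO'
        apply hcond
        rw [Bool.and_eq_true, beq_iff_eq, beq_iff_eq, PySem.List.slice_natCast_add, PySem.List.slice_natCast_add]
        exact ⟨by simpa [pvM] using hM, hO'⟩
      rw [if_neg (by rw [pvCondA_eq nl pred i hL (by omega)]; simp [hO])]
      exact ih hp
  | case3 i pred h =>
    rw [pvScanB, dif_neg h]
    rw [List.filter_eq_nil_iff.mpr ?_]
    · rfl
    intro x hx
    rw [List.mem_range'_1] at hx
    simp only [pvM, decide_eq_true_eq]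
    intro heq
    have hlen := congrArg List.length heq
    simp at hlen
    omega

theorem pvScanB_nomatch (sent nl : List String) (tag : String) (hL : nl ≠ [])
    (hno : ∀ i, i < sent.length → pvM sent nl i = false) (i : Nat) (pred : List String) :
    pvScanB sent nl tag hL i pred = pred := by
  have hL0 : 0 < nl.length := List.length_pos_iff.mpr hL
  induction i, pred using pvScanB.induct sent nl tag hL with
  | case1 i pred h hcond ih =>
    exfalso
    rw [Bool.and_eq_true, beq_iff_eq, beq_iff_eq, PySem.List.slice_natCast_add,
      PySem.List.slice_natCast_add] at hcond
    have := hno i (by omega)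
    simp [pvM, hcond.1] at this
  | case2 i pred h hcond ih => rw [pvScanB, dif_pos h, if_neg hcond]; exact ih
  | case3 i pred h => rw [pvScanB, dif_neg h]

-- ===== VERDICT (by name: the statement is the Claim_ definition above) =====
theorem simple_label_spec : Claim_equal_simple_label := by
  intro sent pred name tag _hdom hpre
  unfold Spec_simple_label simple_label simple_label_alt
  obtain ⟨hnl, hrest⟩ := hpre
  cases hg : PySem.Str.isIn name (PySem.Str.join " " sent) with
  | false => simp
  | true =>
    simp only [Bool.not_true, Bool.false_eq_true, if_false]
    rw [dif_neg hnl]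
    rw [pvStarts_eq sent _ hnl, List.foldl_map]
    rw [List.range_eq_range']
    rcases hrest with hp | hg' | hno
    · have h := pvFold_eq_scan sent (PySem.Str.split₀ name) tag hnl 0 pred hp
      simp only [Nat.sub_zero] at h
      exact h
    · rw [hg] at hg'
      exact absurd hg' (by simp)
    · rw [List.filter_eq_nil_iff.mpr (fun x hx => by
        rw [List.mem_range'_1] at hx
        simp only [Bool.not_eq_true]
        exact hno x (by omega))]
      rw [List.foldl_nil, pvScanB_nomatch sent _ tag hnl hno 0 pred]
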